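-- pv_equiv track=rewrite | github.com/sralloza/chore-management-api | test/common/utils.py | payload_to_table_format
-- ===== SOURCE A (Python) =====
-- def list_of_dicts_to_table_str(list_of_dicts):
--     if not list_of_dicts:
--         return ""
--
--     headlines = list(list_of_dicts[0].keys())
--     result = "|"
--     for heading in headlines:
--         result += heading + "|"
--     result += "\n"
--
--     for line in list_of_dicts:
--         result += "|"
--         for key in headlines:
--             result += f"{line[key]}|"
--         result += "\n"
--
--     return result
--
-- def payload_to_table_format(params):
--     table = []
--     for key, value in params.items():
--         row = {}
--         row["param_name"] = key
--         row["param_value"] = value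
--         table.append(row)
--     return list_of_dicts_to_table_str(table)
-- ===== SOURCE B (Python) =====
-- def payload_to_table_format(params):
--     if not params:
--         return ""
--     lines = ["|param_name|param_value|"]
--     for key, value in params.items():
--         lines.append(f"|{key}|{value}|")
--     return "\n".join(lines) + "\n"
-- ===== Notes on version B (the rewrite author's own statement) =====
-- stated objective: simpler
-- what changed: B drops the intermediate list-of-row-dicts and the generic header-extraction helper: it emits the literal header line and one formatted line per (key, value) pair in a single pass, then joins them with newlines.
import Mathlib
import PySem

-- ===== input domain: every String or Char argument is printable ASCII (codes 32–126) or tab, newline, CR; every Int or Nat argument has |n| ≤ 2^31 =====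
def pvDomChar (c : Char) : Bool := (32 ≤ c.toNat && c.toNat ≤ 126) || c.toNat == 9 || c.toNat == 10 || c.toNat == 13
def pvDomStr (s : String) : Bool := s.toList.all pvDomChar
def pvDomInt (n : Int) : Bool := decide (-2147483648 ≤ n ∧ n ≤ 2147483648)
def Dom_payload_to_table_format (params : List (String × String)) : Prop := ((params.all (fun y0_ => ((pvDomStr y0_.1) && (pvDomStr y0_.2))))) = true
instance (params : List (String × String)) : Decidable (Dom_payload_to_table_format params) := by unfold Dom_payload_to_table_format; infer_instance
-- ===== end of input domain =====

-- B inlines A's two-step pipeline (row-dicts + generic table helper) into one pass that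
-- emits the literal header and one "|key|value|" line per pair, joined by newlines (objective: simpler).


-- ===== PORT A =====
-- helper list_of_dicts_to_table_str, step for step.  `line[key]` is ported as getD with
-- default "": every row reached from payload_to_table_format contains every headline key,
-- so the default is never consulted and the port is exact (no KeyError is reachable).
def list_of_dicts_to_table_str (list_of_dicts : List (PySem.Dict String String)) : String :=
  match list_of_dicts with
  | [] => ""
  | first :: _ =>
    let headlines := first.keys
    let result := "|"
    let result := headlines.foldl (fun r heading => r ++ heading ++ "|") result
    let result := result ++ "\n"
    let result := list_of_dicts.foldl
      (fun r line =>
        (headlines.foldl (fun r key => r ++ (line.getD key "") ++ "|") (r ++ "|")) ++ "\n")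
      result
    result

def payload_to_table_format (params : List (String × String)) : String :=
  let table := params.foldl
    (fun t kv =>
      let row := PySem.Dict.empty
      let row := row.insert "param_name" kv.1
      let row := row.insert "param_value" kv.2
      t ++ [row])
    ([] : List (PySem.Dict String String))
  list_of_dicts_to_table_str table

-- ===== PORT B =====
def payload_to_table_format_alt (params : List (String × String)) : String :=
  if params.isEmpty then ""
  else
    let lines := "|param_name|param_value|" ::
      params.map (fun kv => "|" ++ kv.1 ++ "|" ++ kv.2 ++ "|")
    PySem.Str.join "\n" lines ++ "\n"

-- ===== PRECONDITION & SPEC =====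
def Spec_payload_to_table_format (params : List (String × String)) (out : String) : Prop := out = payload_to_table_format_alt params
instance (params : List (String × String)) (out : String) : Decidable (Spec_payload_to_table_format params out) := by unfold Spec_payload_to_table_format; infer_instance

-- ===== CLAIM (what is proved, stated in full; the proofs are below) =====
def Claim_equal_payload_to_table_format : Prop := ∀ (params : List (String × String)), Dom_payload_to_table_format params → Spec_payload_to_table_format params (payload_to_table_format params)

-- ===== LEMMAS AND PROOFS =====

-- the row dict A builds for one (key, value) pair
def rowD (kv : String × String) : PySem.Dict String String :=
  (PySem.Dict.empty.insert "param_name" kv.1).insert "param_value" kv.2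

-- the concatenation of all data rows, each with its trailing newline
def bodyStr : List (String × String) → String
  | [] => ""
  | kv :: rest => "|" ++ kv.1 ++ "|" ++ kv.2 ++ "|" ++ "\n" ++ bodyStr rest

theorem join_nl_cons (h b : String) (l : List String) :
    PySem.Str.join "\n" (h :: b :: l) = h ++ "\n" ++ PySem.Str.join "\n" (b :: l) := by
  simp [PySem.Str.join, PySem.Chars.join_cons_cons]
  rw [show ('\n' :: PySem.Chars.join ['\n'] (b.toList :: List.map String.toList l))
        = "\n".toList ++ PySem.Chars.join ['\n'] (b.toList :: List.map String.toList l) from rfl]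
  rw [String.ofList_append]
  simp [String.append_assoc]

-- B's join over header :: formatted rows, plus the final newline
theorem Bjoin (ps : List (String × String)) : ∀ h : String,
    PySem.Str.join "\n" (h :: ps.map (fun kv => "|" ++ kv.1 ++ "|" ++ kv.2 ++ "|")) ++ "\n"
      = h ++ "\n" ++ bodyStr ps := by
  induction ps with
  | nil => intro h; simp [PySem.Str.join, bodyStr, String.append_assoc]
  | cons kv rest ih =>
      intro h
      rw [List.map_cons, join_nl_cons, String.append_assoc, String.append_assoc]
      rw [show bodyStr (kv :: rest) = ("|" ++ kv.1 ++ "|" ++ kv.2 ++ "|") ++ "\n" ++ bodyStr rest by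
        simp [bodyStr, String.append_assoc]]
      have := ih ("|" ++ kv.1 ++ "|" ++ kv.2 ++ "|")
      rw [← this]
      simp [String.append_assoc]

-- A's row loop over the built row dicts
theorem Aloop (ps : List (String × String)) : ∀ acc : String,
    (ps.map rowD).foldl
      (fun r line => ((["param_name", "param_value"] : List String).foldl
        (fun r key => r ++ (line.getD key "") ++ "|") (r ++ "|")) ++ "\n") acc
      = acc ++ bodyStr ps := by
  induction ps with
  | nil => intro acc; simp [bodyStr]
  | cons kv rest ih =>
      intro acc
      rw [List.map_cons, List.foldl_cons, ih]
      have h1 : (rowD kv).getD "param_name" "" = kv.1 := rfl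
      have h2 : (rowD kv).getD "param_value" "" = kv.2 := rfl
      simp only [List.foldl_cons, List.foldl_nil, h1, h2, bodyStr]
      simp [String.append_assoc]

-- ===== VERDICT (by name: the statement is the Claim_ definition above) =====
theorem payload_to_table_format_spec : Claim_equal_payload_to_table_format := by
  intro params _
  unfold Spec_payload_to_table_format
  cases params with
  | nil => rfl
  | cons kv rest =>
    unfold payload_to_table_format payload_to_table_format_alt
    rw [show (List.foldl
      (fun t kv =>
        let row := PySem.Dict.empty
        let row := row.insert "param_name" kv.1
        let row := row.insert "param_value" kv.2
        t ++ [row]) ([] : List (PySem.Dict String String)) (kv :: rest)) = (kv :: rest).map rowD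
      from (PySem.List.foldl_append_singleton_eq_map rowD (kv :: rest) []).trans (List.nil_append _)]
    rw [show list_of_dicts_to_table_str ((kv :: rest).map rowD)
      = ((kv :: rest).map rowD).foldl
          (fun r line => ((["param_name", "param_value"] : List String).foldl
            (fun r key => r ++ (line.getD key "") ++ "|") (r ++ "|")) ++ "\n")
          ("|param_name|param_value|" ++ "\n") from rfl]
    rw [Aloop]
    simp only [List.isEmpty_cons, if_neg Bool.false_ne_true]
    rw [Bjoin]
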